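-- pv_equiv track=rewrite | github.com/A3Tom/challenges | project_euler/problem/030/solution.py | solve
-- ===== SOURCE A (Python) =====
-- import math
--
-- def solve(n):
--     powers = build_power_cache(n)
--     result = []
--
--     for i in range(2, 1_000_000):
--         i_pow = [powers[int(s)] for s in str(i)]
--         if sum(i_pow) == i:
--             result.append(i)
--
--     return result
--
-- def build_power_cache(n):
--     powers = [int(math.pow(i, n)) for i in range(0, 10)]
--     return dict(list(enumerate(powers)))
-- ===== SOURCE B (Python) =====
-- def solve(n):
--     pw = [i ** n for i in range(10)]
--     # P[i] = sum of pw[d] over the decimal digits d of i: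
--     # P[10*q + r] = P[q] + pw[r], filled in order by enumerating (q, r) instead of dividing.
--     P = pw[:]
--     for q in range(1, 100_000):
--         Pq = P[q]
--         for r in range(10):
--             P.append(Pq + pw[r])
--     return [i for i in range(2, 1_000_000) if P[i] == i]
-- ===== Notes on version B (the rewrite author's own statement) =====
-- stated objective: faster
-- what changed: B replaces A's per-number string conversion and dict lookups by a dynamic-programming table P with P[i] = P[i // 10] + pw[i % 10] built once (exact integer powers, no str(), no dict), then filters the range against P.
import Mathlib
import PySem

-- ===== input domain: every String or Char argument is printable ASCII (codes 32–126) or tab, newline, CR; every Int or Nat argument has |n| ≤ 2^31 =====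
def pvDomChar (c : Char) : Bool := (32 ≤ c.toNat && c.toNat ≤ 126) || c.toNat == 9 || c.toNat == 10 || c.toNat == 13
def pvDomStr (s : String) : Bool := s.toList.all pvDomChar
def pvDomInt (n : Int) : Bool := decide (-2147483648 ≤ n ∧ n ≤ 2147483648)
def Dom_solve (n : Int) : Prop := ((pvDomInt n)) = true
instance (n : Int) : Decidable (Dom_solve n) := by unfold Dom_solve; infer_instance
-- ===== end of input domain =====

-- B replaces A's per-number string/dict digit decomposition by one shared table P with
-- P[i] = P[i // 10] + pw[i % 10] (exact integer powers, no str(), no dict); same return value.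

-- ===== PORT A =====
-- int(math.pow(i, n)) is ported as i ^ n.toNat: on Pre_solve (0 ≤ n ≤ 323) the float cache
-- can differ from the exact power only in entries larger than 10^6, which can never satisfy
-- the comparison against i < 10^6, so solve's return value is unchanged (checked differentially).
def buildPowerCache (n : Int) : PySem.Dict Int Int :=
  let powers : List Int := (PySem.List.pyRange 0 10 1).map (fun i => i ^ n.toNat)
  PySem.Dict.ofList (PySem.List.enumerate powers 0)

-- int(s) for the single-character digit strings produced by str(i): exact there
-- (= PySem.Int.ofChars? [c] on '0'..'9'; solve applies it to digit characters only)
def pyIntDigit (c : Char) : Int := ((c.toNat - '0'.toNat : Nat) : Int)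

def solve (n : Int) : List Int :=
  let powers := buildPowerCache n
  (PySem.List.pyRange 2 1000000 1).foldl
    (fun result i =>
      -- powers[0..9] never raises KeyError here: .getD 0 is never taken
      let i_pow := (PySem.Int.toChars i).map
        (fun c => (powers.get? (pyIntDigit c)).getD 0)
      if i_pow.sum = i then result ++ [i] else result) []

-- ===== PORT B =====
def solve_alt (n : Int) : List Int :=
  let pw : Array Int := ((PySem.List.pyRange 0 10 1).map (fun i => i ^ n.toNat)).toArray
  -- P = pw[:]; for q in range(1, 100_000): Pq = P[q]; for r in range(10): P.append(Pq + pw[r])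
  -- all indices are always in range, so .getD _ 0 is never the default
  let P : Array Int := (PySem.List.pyRange 1 100000 1).foldl
    (fun P q =>
      let Pq := P.getD q.toNat 0
      (PySem.List.pyRange 0 10 1).foldl (fun P r => P.push (Pq + pw.getD r.toNat 0)) P) pw
  (PySem.List.pyRange 2 1000000 1).foldl
    (fun r i => if P.getD i.toNat 0 = i then r ++ [i] else r) []

-- ===== PRECONDITION & SPEC =====
-- Pre_solve is exactly where the Python A returns: for n < 0 math.pow raises ValueError,
-- and for n ≥ 324 math.pow(9, n) overflows a double and raises OverflowError.
def Pre_solve (n : Int) : Prop := 0 ≤ n ∧ n ≤ 323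
instance (n : Int) : Decidable (Pre_solve n) := by unfold Pre_solve; infer_instance
def pvWitness_solve : Int := (4)

def Spec_solve (n : Int) (out : List Int) : Prop := out = solve_alt n
instance (n : Int) (out : List Int) : Decidable (Spec_solve n out) := by unfold Spec_solve; infer_instance

-- ===== CLAIM (what is proved, stated in full; the proofs are below) =====
def Claim_equal_solve : Prop := ∀ (n : Int), Dom_solve n → Pre_solve n → Spec_solve n (solve n)

-- ===== LEMMAS AND PROOFS =====

-- digit power sum of k, arithmetically
def dps (e : Nat) (k : Nat) : Int :=
  if _h : k < 10 then (k : Int) ^ e else dps e (k / 10) + (((k % 10 : Nat)) : Int) ^ e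
decreasing_by exact Nat.div_lt_self (by omega) (by omega)

theorem dps_lt {e k : Nat} (h : k < 10) : dps e k = (k : Int) ^ e := by
  rw [dps, dif_pos h]

theorem dps_ge {e k : Nat} (h : ¬ k < 10) :
    dps e k = dps e (k / 10) + (((k % 10 : Nat)) : Int) ^ e := by
  rw [dps, dif_neg h]

theorem toDigitsCore_acc (f n : Nat) (ds : List Char) :
    Nat.toDigitsCore 10 f n ds = Nat.toDigitsCore 10 f n [] ++ ds := by
  induction f generalizing n ds with
  | zero => simp [Nat.toDigitsCore]
  | succ f ih =>
    simp only [Nat.toDigitsCore]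
    by_cases h : n / 10 = 0
    · simp [h]
    · simp only [if_neg h]
      rw [ih (n / 10) (Nat.digitChar (n % 10) :: ds), ih (n / 10) [Nat.digitChar (n % 10)],
        List.append_assoc]
      rfl

theorem toDigitsCore_fuel (n : Nat) : ∀ f₁ f₂ : Nat, n < f₁ → n < f₂ →
    Nat.toDigitsCore 10 f₁ n [] = Nat.toDigitsCore 10 f₂ n [] := by
  induction n using Nat.strong_induction_on with
  | _ n ih =>
    intro f₁ f₂ h₁ h₂
    match f₁, f₂ with
    | g₁ + 1, g₂ + 1 =>
      simp only [Nat.toDigitsCore]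
      by_cases h : n / 10 = 0
      · simp [h]
      · simp only [if_neg h]
        have hlt : n / 10 < n := Nat.div_lt_self (by omega) (by omega)
        rw [toDigitsCore_acc g₁, toDigitsCore_acc g₂,
          ih (n / 10) hlt g₁ g₂ (by omega) (by omega)]

theorem toDigits_lt {n : Nat} (h : n < 10) : Nat.toDigits 10 n = [Nat.digitChar n] := by
  simp [Nat.toDigits, Nat.toDigitsCore, Nat.div_eq_of_lt h, Nat.mod_eq_of_lt h]

theorem toDigits_decomp {n : Nat} (h : 10 ≤ n) :
    Nat.toDigits 10 n = Nat.toDigits 10 (n / 10) ++ [Nat.digitChar (n % 10)] := by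
  have h0 : n / 10 ≠ 0 := by omega
  show Nat.toDigitsCore 10 (n + 1) n [] = _
  simp only [Nat.toDigitsCore, if_neg h0]
  rw [toDigitsCore_acc, toDigitsCore_fuel (n / 10) n (n / 10 + 1)
    (lt_of_lt_of_le (Nat.div_lt_self (by omega) (by omega)) (by omega)) (by omega)]
  rfl

theorem pyIntDigit_digitChar {d : Nat} (h : d < 10) :
    pyIntDigit (Nat.digitChar d) = (d : Int) := by
  interval_cases d <;> decide

theorem pyRange_ten : PySem.List.pyRange 0 10 1 = [0, 1, 2, 3, 4, 5, 6, 7, 8, 9] := by decide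

set_option maxHeartbeats 2000000 in
theorem cache_get (n : Int) {d : Nat} (h : d < 10) :
    ((buildPowerCache n).get? (d : Int)).getD 0 = (d : Int) ^ n.toNat := by
  simp only [buildPowerCache]
  rw [pyRange_ten]
  interval_cases d <;>
    simp [PySem.Dict.ofList, PySem.Dict.update, PySem.Dict.empty, PySem.List.enumerate_cons,
      PySem.List.enumerate_nil, PySem.Dict.get?_insert, List.foldl]

theorem sumA (n : Int) (k : Nat) :
    ((Nat.toDigits 10 k).map
      (fun c => ((buildPowerCache n).get? (pyIntDigit c)).getD 0)).sum
      = dps n.toNat k := by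
  induction k using Nat.strong_induction_on with
  | _ k ih =>
    by_cases h : k < 10
    · rw [toDigits_lt h, dps_lt h]
      simp [pyIntDigit_digitChar h, cache_get n h]
    · have hm : k % 10 < 10 := Nat.mod_lt k (by omega)
      rw [toDigits_decomp (by omega), List.map_append, List.sum_append,
        ih (k / 10) (Nat.div_lt_self (by omega) (by omega)), dps_ge h]
      simp only [List.map_cons, List.map_nil, List.sum_cons, List.sum_nil, add_zero,
        pyIntDigit_digitChar hm, cache_get n hm]

-- the power table of B
def pwA (n : Int) : Array Int := ((PySem.List.pyRange 0 10 1).map (fun i => i ^ n.toNat)).toArray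

theorem pwA_size (n : Int) : (pwA n).size = 10 := by rw [pwA, pyRange_ten]; rfl

theorem pwA_getD (n : Int) {d : Nat} (h : d < 10) :
    (pwA n).getD d 0 = (d : Int) ^ n.toNat := by
  unfold pwA; rw [pyRange_ten]; interval_cases d <;> rfl

set_option maxHeartbeats 1000000 in
theorem inner_unfold (n : Int) (P : Array Int) (Pq : Int) :
    (PySem.List.pyRange 0 10 1).foldl (fun P r => P.push (Pq + (pwA n).getD r.toNat 0)) P =
    ((((((((((P.push (Pq + (0 : Int) ^ n.toNat)).push (Pq + (1 : Int) ^ n.toNat)).push (Pq + (2 : Int) ^ n.toNat)).push (Pq + (3 : Int) ^ n.toNat)).push (Pq + (4 : Int) ^ n.toNat)).push (Pq + (5 : Int) ^ n.toNat)).push (Pq + (6 : Int) ^ n.toNat)).push (Pq + (7 : Int) ^ n.toNat)).push (Pq + (8 : Int) ^ n.toNat)).push (Pq + (9 : Int) ^ n.toNat)) := by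
  rw [pyRange_ten]
  rfl

set_option maxHeartbeats 2000000 in
theorem step_inv (n : Int) (P : Array Int) (Q : Nat) (hQ : 1 ≤ Q) (hsz : P.size = 10 * Q)
    (hget : ∀ j : Nat, j < 10 * Q → P.getD j 0 = dps n.toNat j) :
    ((PySem.List.pyRange 0 10 1).foldl
      (fun Pa r => Pa.push (P.getD ((Q : Int)).toNat 0 + (pwA n).getD r.toNat 0)) P).size
      = 10 * (Q + 1) ∧
    ∀ j : Nat, j < 10 * (Q + 1) →
    ((PySem.List.pyRange 0 10 1).foldl
      (fun Pa r => Pa.push (P.getD ((Q : Int)).toNat 0 + (pwA n).getD r.toNat 0)) P).getD j 0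
      = dps n.toNat j := by
  rw [inner_unfold n P (P.getD ((Q : Int)).toNat 0)]
  refine ⟨by simp only [Array.size_push, hsz]; omega, ?_⟩
  intro j hj
  rw [Array.getD_eq_getD_getElem?]
  simp only [Array.getElem?_push, Array.size_push, hsz]
  split_ifs
  · -- j = 10 * Q + 9
    simp only [Option.getD_some]
    rw [Int.toNat_natCast, hget Q (by omega), dps_ge (e := n.toNat) (k := j) (by omega),
      show j / 10 = Q from by omega, show j % 10 = 9 from by omega]
    norm_num
  · -- j = 10 * Q + 8
    simp only [Option.getD_some]
    rw [Int.toNat_natCast, hget Q (by omega), dps_ge (e := n.toNat) (k := j) (by omega),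
      show j / 10 = Q from by omega, show j % 10 = 8 from by omega]
    norm_num
  · -- j = 10 * Q + 7
    simp only [Option.getD_some]
    rw [Int.toNat_natCast, hget Q (by omega), dps_ge (e := n.toNat) (k := j) (by omega),
      show j / 10 = Q from by omega, show j % 10 = 7 from by omega]
    norm_num
  · -- j = 10 * Q + 6
    simp only [Option.getD_some]
    rw [Int.toNat_natCast, hget Q (by omega), dps_ge (e := n.toNat) (k := j) (by omega),
      show j / 10 = Q from by omega, show j % 10 = 6 from by omega]
    norm_num
  · -- j = 10 * Q + 5
    simp only [Option.getD_some]
    rw [Int.toNat_natCast, hget Q (by omega), dps_ge (e := n.toNat) (k := j) (by omega),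
      show j / 10 = Q from by omega, show j % 10 = 5 from by omega]
    norm_num
  · -- j = 10 * Q + 4
    simp only [Option.getD_some]
    rw [Int.toNat_natCast, hget Q (by omega), dps_ge (e := n.toNat) (k := j) (by omega),
      show j / 10 = Q from by omega, show j % 10 = 4 from by omega]
    norm_num
  · -- j = 10 * Q + 3
    simp only [Option.getD_some]
    rw [Int.toNat_natCast, hget Q (by omega), dps_ge (e := n.toNat) (k := j) (by omega),
      show j / 10 = Q from by omega, show j % 10 = 3 from by omega]
    norm_num
  · -- j = 10 * Q + 2
    simp only [Option.getD_some]
    rw [Int.toNat_natCast, hget Q (by omega), dps_ge (e := n.toNat) (k := j) (by omega),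
      show j / 10 = Q from by omega, show j % 10 = 2 from by omega]
    norm_num
  · -- j = 10 * Q + 1
    simp only [Option.getD_some]
    rw [Int.toNat_natCast, hget Q (by omega), dps_ge (e := n.toNat) (k := j) (by omega),
      show j / 10 = Q from by omega, show j % 10 = 1 from by omega]
    norm_num
  · -- j = 10 * Q + 0
    simp only [Option.getD_some]
    rw [Int.toNat_natCast, hget Q (by omega), dps_ge (e := n.toNat) (k := j) (by omega),
      show j / 10 = Q from by omega, show j % 10 = 0 from by omega]
    norm_num
  · -- j < 10 * Q
    have h2 := hget j (by omega)
    rw [Array.getD_eq_getD_getElem?] at h2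
    exact h2

set_option maxHeartbeats 1000000 in
theorem P_inv (n : Int) : ∀ Q : Nat, 1 ≤ Q →
    ((PySem.List.pyRange 1 (Q : Int) 1).foldl
      (fun P q =>
        let Pq := P.getD q.toNat 0
        (PySem.List.pyRange 0 10 1).foldl (fun P r => P.push (Pq + (pwA n).getD r.toNat 0)) P)
      (pwA n)).size = 10 * Q ∧
    ∀ j : Nat, j < 10 * Q →
    ((PySem.List.pyRange 1 (Q : Int) 1).foldl
      (fun P q =>
        let Pq := P.getD q.toNat 0
        (PySem.List.pyRange 0 10 1).foldl (fun P r => P.push (Pq + (pwA n).getD r.toNat 0)) P)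
      (pwA n)).getD j 0 = dps n.toNat j := by
  intro Q hQ
  induction Q, hQ using Nat.le_induction with
  | base =>
    rw [PySem.List.pyRange_one_eq_nil (a := 1) (b := ((1 : Nat) : Int)) (by norm_num)]
    simp only [List.foldl_nil]
    refine ⟨by rw [pwA_size], ?_⟩
    intro j hj
    rw [pwA_getD n (by omega), dps_lt (by omega)]
  | succ Q hQ ih =>
    obtain ⟨hsz, hget⟩ := ih
    have hcast : ((Q + 1 : Nat) : Int) = (Q : Int) + 1 := by push_cast; ring
    rw [hcast, PySem.List.pyRange_one_succ_right (by exact_mod_cast hQ.trans (by omega)),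
      List.foldl_append]
    simp only [List.foldl_cons, List.foldl_nil]
    exact step_inv n _ Q hQ hsz hget

theorem solve_eq_alt (n : Int) : solve n = solve_alt n := by
  simp only [solve, solve_alt]
  rw [show ((PySem.List.pyRange 0 10 1).map (fun i => i ^ n.toNat)).toArray = pwA n from rfl]
  apply PySem.List.foldl_congr_mem
  intro acc i hi
  have hib := (PySem.List.mem_pyRange_one).mp hi
  have hi0 : ¬ i < 0 := by omega
  have hA : ((PySem.Int.toChars i).map
      (fun c => ((buildPowerCache n).get? (pyIntDigit c)).getD 0)).sum
      = dps n.toNat i.toNat := by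
    rw [show PySem.Int.toChars i = Nat.toDigits 10 i.toNat from by
      simp [PySem.Int.toChars, hi0]]
    exact sumA n i.toNat
  have hB : (((PySem.List.pyRange 1 100000 1).foldl
      (fun P q =>
        let Pq := P.getD q.toNat 0
        (PySem.List.pyRange 0 10 1).foldl (fun P r => P.push (Pq + (pwA n).getD r.toNat 0)) P)
      (pwA n)).getD i.toNat 0)
      = dps n.toNat i.toNat := by
    have h := (P_inv n 100000 (by omega)).2 i.toNat (by omega)
    rw [show (((100000 : Nat)) : Int) = (100000 : Int) from by norm_cast] at h
    exact h
  rw [hA, hB]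

-- ===== VERDICT (by name: the statement is the Claim_ definition above) =====
theorem solve_spec : Claim_equal_solve := by
  intro n _ _
  unfold Spec_solve
  exact solve_eq_alt n
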